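-- pv_equiv track=rewrite | github.com/clubalgoritmos/CompetitiveProgramming | 1007_Pipo_el_payaso.py | obtCantPref
-- ===== SOURCE A (Python) =====
-- def obtCantPref(n):
--     pre = []
--     for i in n:
--         pre.append(i[0])
--     letra = []
--     mayor = 0
--     for i in pre:
--         if i in letra:
--             continue
--         letra.append(i)
--         nu = pre.count(i)
--         if nu > mayor:
--             mayor = nu
--     return mayor
-- ===== SOURCE B (Python) =====
-- def obtCantPref(n):
--     counts = {}
--     for s in n:
--         c = s[0]
--         counts[c] = counts.get(c, 0) + 1
--     return max(counts.values(), default=0)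
-- ===== Notes on version B (the rewrite author's own statement) =====
-- stated objective: alternative
-- what changed: Replaces A's per-distinct-letter rescans (pre.count inside the loop) with one dictionary counting pass over the first letters followed by a single max over the counts.
import Mathlib
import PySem

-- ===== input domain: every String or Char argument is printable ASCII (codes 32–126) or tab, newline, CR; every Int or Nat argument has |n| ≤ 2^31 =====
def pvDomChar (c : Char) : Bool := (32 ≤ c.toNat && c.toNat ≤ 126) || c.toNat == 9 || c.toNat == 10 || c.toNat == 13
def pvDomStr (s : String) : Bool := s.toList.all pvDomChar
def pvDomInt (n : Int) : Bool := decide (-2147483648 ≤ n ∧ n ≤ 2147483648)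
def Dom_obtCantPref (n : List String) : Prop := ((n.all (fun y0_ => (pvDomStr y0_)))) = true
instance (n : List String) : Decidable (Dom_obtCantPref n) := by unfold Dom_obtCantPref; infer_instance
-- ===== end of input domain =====

-- B replaces A's repeated pre.count scans with one dict counting pass plus a max over the counts.

-- first character of a Python string; Pre_ guarantees the pyGet? never returns none
-- (on "" Python raises IndexError, which Pre_ excludes; the ' ' default is unreachable inside Pre_)
def pvFirst (s : String) : Char := (PySem.Str.pyGet? s 0).getD ' '

-- ===== PORT A =====
def obtCantPref (n : List String) : Int :=
  let pre : List Char := n.foldl (fun acc i => acc ++ [pvFirst i]) []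
  let st : List Char × Int :=
    pre.foldl (fun (s : List Char × Int) i =>
      if i ∈ s.1 then s
      else
        let letra := s.1 ++ [i]
        let nu : Int := PySem.List.count pre i
        (letra, if nu > s.2 then nu else s.2)) ([], 0)
  st.2

-- ===== PORT B =====
def obtCantPref_alt (n : List String) : Int :=
  let counts : PySem.Dict Char Int :=
    n.foldl (fun d s =>
      let c := pvFirst s
      d.insert c (d.getD c 0 + 1)) PySem.Dict.empty
  (PySem.List.max? counts.values (fun x => x)).getD 0

-- ===== PRECONDITION & SPEC =====
-- Pre_ excludes lists containing an empty string, on which A (i[0]) raises IndexError (B raises there too).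
def Pre_obtCantPref (n : List String) : Prop := ∀ s ∈ n, s ≠ ""
instance (n : List String) : Decidable (Pre_obtCantPref n) := by unfold Pre_obtCantPref; infer_instance

def pvWitness_obtCantPref : List String := ["ab", "b", "ac", "b"]

def Spec_obtCantPref (n : List String) (out : Int) : Prop := out = obtCantPref_alt n
instance (n : List String) (out : Int) : Decidable (Spec_obtCantPref n out) := by unfold Spec_obtCantPref; infer_instance

-- ===== CLAIM (what is proved, stated in full; the proofs are below) =====
def Claim_equal_obtCantPref : Prop := ∀ (n : List String), Dom_obtCantPref n → Pre_obtCantPref n → Spec_obtCantPref n (obtCantPref n)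

-- ===== LEMMAS AND PROOFS =====

-- building pre by appending singletons is map
theorem pvPre_eq_map (n : List String) (acc : List Char) :
    n.foldl (fun acc i => acc ++ [pvFirst i]) acc = acc ++ n.map pvFirst := by
  induction n generalizing acc with
  | nil => simp
  | cons h t ih => simp [List.foldl_cons, ih]

-- B's fold over n with key pvFirst is the counter of the mapped list
theorem pvCounts_eq_counter (n : List String) :
    n.foldl (fun d s => let c := pvFirst s; d.insert c (d.getD c 0 + 1)) PySem.Dict.empty
      = PySem.Dict.counter (n.map pvFirst) := by
  rw [← PySem.Dict.foldl_insert_getD_add_one_eq_counter, List.foldl_map]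

-- A's loop: the second component is a running max of g over the NEW distinct elements
theorem pvLoopA (g : Char → Int) (rest : List Char) (letra : List Char) (mayor : Int) :
    (rest.foldl (fun (s : List Char × Int) i =>
        if i ∈ s.1 then s
        else (s.1 ++ [i], if g i > s.2 then g i else s.2)) (letra, mayor)).2
      = ((PySem.Set.update letra rest).drop letra.length).foldl
          (fun m c => if g c > m then g c else m) mayor := by
  induction rest generalizing letra mayor with
  | nil => simp [PySem.Set.update]
  | cons h t ih =>
    by_cases hm : h ∈ letra
    · have hadd : PySem.Set.add letra h = letra := by
        simp [PySem.Set.add, PySem.Set.contains, hm]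
      simp only [List.foldl_cons, if_pos hm, PySem.Set.update_cons, hadd]
      exact ih letra mayor
    · have hadd : PySem.Set.add letra h = letra ++ [h] := by
        simp [PySem.Set.add, PySem.Set.contains, hm]
      simp only [List.foldl_cons, if_neg hm, PySem.Set.update_cons, hadd]
      rw [ih (letra ++ [h]) _]
      rw [PySem.Set.update_eq_append_filter (letra ++ [h]) t]
      have h1 : ((letra ++ [h]) ++ (PySem.Set.ofList t).filter
          (fun y => !(PySem.Set.contains (letra ++ [h]) y))).drop letra.length
          = h :: ((PySem.Set.ofList t).filter (fun y => !(PySem.Set.contains (letra ++ [h]) y))) := by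
        rw [List.append_assoc, List.drop_append_of_le_length (by simp)]
        simp
      have h2 : ((letra ++ [h]) ++ (PySem.Set.ofList t).filter
          (fun y => !(PySem.Set.contains (letra ++ [h]) y))).drop (letra ++ [h]).length
          = (PySem.Set.ofList t).filter (fun y => !(PySem.Set.contains (letra ++ [h]) y)) := by
        rw [List.drop_append_of_le_length (by simp)]
        simp
      rw [h1, h2, List.foldl_cons]

-- the if-form of the running max equals foldl max (with a projection)
theorem pvFoldlIfMax (g : Char → Int) (l : List Char) (m : Int) :
    l.foldl (fun m c => if g c > m then g c else m) m = l.foldl (fun m c => max m (g c)) m := by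
  induction l generalizing m with
  | nil => rfl
  | cons h t ih =>
    simp only [List.foldl_cons, ih]
    congr 1
    omega

-- ===== VERDICT (by name: the statement is the Claim_ definition above) =====
theorem obtCantPref_spec : Claim_equal_obtCantPref := by
  intro n _ _
  unfold Spec_obtCantPref obtCantPref obtCantPref_alt
  simp only [pvPre_eq_map, List.nil_append, pvCounts_eq_counter]
  set pre := n.map pvFirst with hpre
  set g : Char → Int := fun c => PySem.List.count pre c with hg
  have hA := pvLoopA g pre [] 0
  simp only [List.length_nil, List.drop_zero, PySem.Set.update_nil_left] at hA
  -- values of the counter are the counts of the distinct elements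
  have hvals : (PySem.Dict.counter pre).values = (PySem.Set.ofList pre).map (fun k => (pre.count k : Int)) := by
    show (PySem.Dict.counter pre).items.map (·.2) = _
    rw [PySem.Dict.items_counter]
    simp [List.map_map, Function.comp]
  rw [hA, hvals]
  cases hd : PySem.Set.ofList pre with
  | nil => simp [PySem.List.max?]
  | cons d ds =>
    rw [List.map_cons, PySem.List.max?_id_cons, Option.getD_some]
    have hmem : d ∈ pre := by
      have : d ∈ PySem.Set.ofList pre := by rw [hd]; exact List.mem_cons_self
      exact (PySem.Set.mem_ofList _ _).mp this
    have hpos : (0 : Int) < g d := by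
      have : 0 < pre.count d := List.count_pos_iff.mpr hmem
      simp only [hg, PySem.List.count]
      exact_mod_cast this
    have hcount : g d = (pre.count d : Int) := by simp [hg, PySem.List.count]
    simp only [List.foldl_cons]
    rw [show (if g d > (0 : Int) then g d else 0) = g d from if_pos hpos]
    rw [pvFoldlIfMax, List.foldl_map, ← hcount]
    simp [hg, PySem.List.count]
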